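-- pv_equiv track=rewrite | github.com/VeronikaNguyen/AdventOfCode2021 | day03/functions.py | power_consumption
-- ===== SOURCE A (Python) =====
-- from typing import List
--
-- def power_consumption(diagnostic_report: List[str]) -> int:
--     binary_gamma_rate, binary_epsilon_rate = "", ""
--     for position in range(len(diagnostic_report[0])):
--         count = 0
--         for entry in diagnostic_report:
--             if entry[position] == "1":
--                 count += 1
--         if count > len(diagnostic_report) / 2:
--             binary_gamma_rate += "1"
--             binary_epsilon_rate += "0"
--         else:
--             binary_gamma_rate += "0"
--             binary_epsilon_rate += "1"
--     gamma_rate, epsilon_rate = int(binary_gamma_rate, 2), int(binary_epsilon_rate, 2)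
--     return gamma_rate * epsilon_rate
-- ===== SOURCE B (Python) =====
-- from typing import List
--
-- def power_consumption(diagnostic_report: List[str]) -> int:
--     n = len(diagnostic_report)
--     width = len(diagnostic_report[0])
--     counts = [0] * width
--     for entry in diagnostic_report:
--         counts = [ones + (entry[i] == "1") for i, ones in enumerate(counts)]
--     gamma = 0
--     for ones in counts:
--         gamma = 2 * gamma + (2 * ones > n)
--     epsilon = (1 << width) - 1 - gamma
--     return gamma * epsilon
-- ===== Notes on version B (the rewrite author's own statement) =====
-- stated objective: alternative
-- what changed: B traverses the report row-major in a single pass, maintaining one per-column counter vector rebuilt from each row with enumerate (A scans column-major with a nested loop per column), then assembles gamma as an integer from the counter vector and derives epsilon arithmetically as the width-bit complement (1<<width)-1-gamma instead of building and re-parsing two binary strings.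
import Mathlib
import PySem

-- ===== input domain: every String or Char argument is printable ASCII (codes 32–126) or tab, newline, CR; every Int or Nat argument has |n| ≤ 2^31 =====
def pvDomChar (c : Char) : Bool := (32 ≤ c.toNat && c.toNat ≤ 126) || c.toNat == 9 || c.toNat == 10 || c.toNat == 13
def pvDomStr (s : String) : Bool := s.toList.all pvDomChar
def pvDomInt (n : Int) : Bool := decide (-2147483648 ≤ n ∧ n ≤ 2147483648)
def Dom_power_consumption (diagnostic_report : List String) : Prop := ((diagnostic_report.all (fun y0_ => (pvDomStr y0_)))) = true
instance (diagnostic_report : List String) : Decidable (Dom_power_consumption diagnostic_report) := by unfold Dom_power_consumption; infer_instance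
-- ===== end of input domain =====

-- B traverses the report row-major in one pass, maintaining a per-column counter vector
-- updated by zipping it with each row, then assembles gamma from that vector and derives
-- epsilon as the arithmetic width-bit complement — instead of A's column-major nested
-- loops that build two binary strings and re-parse them with int(s, 2).

-- ===== PORT A =====
-- int(s, 2): ported by hand; exact for the strings this call receives: they consist only
-- of '0'/'1' characters (the loop below appends nothing else), on which int(·, 2) is
-- exactly this positional-value fold; the empty string (Python's ValueError) is excluded
-- by Pre_power_consumption.
def pvIntBase2 (cs : List Char) : Int :=
  cs.foldl (fun a c => 2 * a + (if c = '1' then 1 else 0)) 0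

def power_consumption (diagnostic_report : List String) : Int :=
  -- len(diagnostic_report[0]); the IndexError on [] is excluded by Pre_power_consumption
  let width : Int := PySem.Str.len (PySem.List.pyGetD diagnostic_report 0 "")
  let ge := (PySem.List.pyRange 0 width 1).foldl
    (fun (ge : List Char × List Char) position =>
      let count := diagnostic_report.foldl
        (fun count entry =>
          -- entry[position]; the IndexError case is excluded by Pre_power_consumption
          if PySem.Str.pyGet? entry position = some '1' then count + 1 else count)
        (0 : Int)
      -- 'count > len(diagnostic_report) / 2': Python float division, exact for these
      -- integer sizes, so the comparison is exactly 2*count > len(diagnostic_report)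
      if 2 * count > (diagnostic_report.length : Int) then
        (ge.1 ++ ['1'], ge.2 ++ ['0'])
      else
        (ge.1 ++ ['0'], ge.2 ++ ['1']))
    ([], [])
  pvIntBase2 ge.1 * pvIntBase2 ge.2

-- ===== PORT B =====
def power_consumption_alt (diagnostic_report : List String) : Int :=
  let n : Int := diagnostic_report.length
  -- len(diagnostic_report[0]); the IndexError on [] is excluded by Pre_power_consumption
  let width : Int := PySem.Str.len (PySem.List.pyGetD diagnostic_report 0 "")
  -- counts = [0] * width
  let counts0 : List Int := List.replicate width.toNat 0
  -- for entry: counts = [ones + (entry[i] == "1") for i, ones in enumerate(counts)]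
  -- entry[i]; the IndexError case (a row shorter than the first) is excluded by Pre_
  let counts := diagnostic_report.foldl
    (fun (cs : List Int) entry =>
      (PySem.List.enumerate cs 0).map
        (fun p => p.2 + (if PySem.Str.pyGet? entry p.1 = some '1' then (1 : Int) else 0)))
    counts0
  -- gamma accumulated bit by bit from the counter vector
  let gamma := counts.foldl
    (fun g ones => 2 * g + (if 2 * ones > n then (1 : Int) else 0)) 0
  -- (1 << width) - 1 - gamma  (width = len(...) is ≥ 0, so the shift count is width.toNat)
  let epsilon := ((1 : Int) <<< width.toNat) - 1 - gamma
  gamma * epsilon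

-- ===== PRECONDITION & SPEC =====
-- Pre_ excludes exactly the inputs on which A raises: the empty report (IndexError on
-- diagnostic_report[0]), a first line of width 0 (int('', 2) is a ValueError), and a report
-- with a line shorter than the first (IndexError on entry[position]).
def Pre_power_consumption (diagnostic_report : List String) : Prop :=
  diagnostic_report ≠ [] ∧
  0 < (diagnostic_report.headD "").toList.length ∧
  ∀ s ∈ diagnostic_report,
    (diagnostic_report.headD "").toList.length ≤ s.toList.length

instance (diagnostic_report : List String) : Decidable (Pre_power_consumption diagnostic_report) := by
  unfold Pre_power_consumption; infer_instance

def pvWitness_power_consumption : List String := ["10", "01", "11"]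

def Spec_power_consumption (diagnostic_report : List String) (out : Int) : Prop :=
  out = power_consumption_alt diagnostic_report
instance (diagnostic_report : List String) (out : Int) : Decidable (Spec_power_consumption diagnostic_report out) := by
  unfold Spec_power_consumption; infer_instance

-- ===== CLAIM (what is proved, stated in full; the proofs are below) =====
def Claim_equal_power_consumption : Prop := ∀ (diagnostic_report : List String), Dom_power_consumption diagnostic_report → Pre_power_consumption diagnostic_report → Spec_power_consumption diagnostic_report (power_consumption diagnostic_report)

-- ===== LEMMAS AND PROOFS =====

-- the j-th column of the report, and the majority bit of that column
def pvCol (dr : List String) (j : Nat) : List Char :=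
  dr.map (fun s => s.toList.getD j ' ')

def pvBit (dr : List String) (j : Nat) : Bool :=
  decide ((2 : Int) * ((pvCol dr j).count '1' : Int) > (dr.length : Int))

def pvBits (dr : List String) (w : Nat) : List Bool :=
  (List.range w).map (pvBit dr)

def pvBinAux (a : Int) (bs : List Bool) : Int :=
  bs.foldl (fun a b => 2 * a + (if b then 1 else 0)) a

theorem pvBinAux_cons (b : Bool) (t : List Bool) (a : Int) :
    pvBinAux a (b :: t) = pvBinAux (2 * a + (if b then 1 else 0)) t := rfl

theorem pvBinAux_shift (bs : List Bool) (a : Int) :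
    pvBinAux a bs = a * 2 ^ bs.length + pvBinAux 0 bs := by
  induction bs generalizing a with
  | nil => simp [pvBinAux]
  | cons b t ih =>
    rw [pvBinAux_cons, ih, show pvBinAux 0 (b :: t) = pvBinAux (2 * 0 + (if b then 1 else 0)) t from rfl,
      ih, List.length_cons]
    rw [ih (2 * 0 + if b = true then (1 : Int) else 0)]
    ring

theorem pvBinAux_compl (bs : List Bool) :
    pvBinAux 0 bs + pvBinAux 0 (bs.map (fun b => !b)) = 2 ^ bs.length - 1 := by
  induction bs with
  | nil => simp [pvBinAux]
  | cons b t ih =>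
    simp only [List.map_cons, pvBinAux_cons, List.length_cons]
    rw [pvBinAux_shift, pvBinAux_shift (t.map (fun b => !b)), List.length_map, pow_succ]
    generalize (2 : Int) ^ t.length = P at *
    cases b <;> simp <;> omega

-- A's inner counting loop is the count of '1' in column j
theorem countA_eq (dr : List String) (j : Nat) (a : Int)
    (h : ∀ s ∈ dr, j < s.toList.length) :
    dr.foldl (fun c entry =>
        if PySem.Str.pyGet? entry ((j : Nat) : Int) = some '1' then c + 1 else c) a
      = a + ((pvCol dr j).count '1' : Int) := by
  induction dr generalizing a with
  | nil => simp [pvCol]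
  | cons s rest ih =>
    have hj : j < s.toList.length := h s (List.mem_cons_self)
    have hrest : ∀ t ∈ rest, j < t.toList.length := fun t ht => h t (List.mem_cons_of_mem _ ht)
    have hget : PySem.Str.pyGet? s ((j : Nat) : Int) = some s.toList[j] := by
      simp [List.getElem?_eq_getElem hj]
    have hgetD : s.toList.getD j ' ' = s.toList[j] := List.getD_eq_getElem _ _ hj
    simp only [List.foldl_cons, hget, Option.some.injEq]
    rw [ih _ hrest]
    simp only [pvCol, List.map_cons, List.count_cons, hgetD]
    by_cases hc : s.toList[j] = '1'
    · simp [hc]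
      omega
    · simp [hc]

-- A's string loop reads the bits through the helper below
theorem pvIntBase2_bits (bs : List Bool) (a : Int) :
    (bs.map (fun b => if b then '1' else '0')).foldl
        (fun a c => 2 * a + (if c = '1' then 1 else 0)) a
      = pvBinAux a bs := by
  induction bs generalizing a with
  | nil => simp [pvBinAux]
  | cons b t ih =>
    simp only [List.map_cons, List.foldl_cons, pvBinAux_cons]
    rw [ih]
    cases b <;> simp

theorem pvIntBase2_nbits (bs : List Bool) (a : Int) :
    (bs.map (fun b => if !b then '1' else '0')).foldl
        (fun a c => 2 * a + (if c = '1' then 1 else 0)) a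
      = pvBinAux a (bs.map (fun b => !b)) := by
  induction bs generalizing a with
  | nil => simp [pvBinAux]
  | cons b t ih =>
    simp only [List.map_cons, List.foldl_cons, pvBinAux_cons]
    rw [ih]
    cases b <;> simp

-- A's outer loop: the two strings it builds are the majority bits and their complements
theorem foldA_eq (dr : List String) (w : Nat)
    (h : ∀ s ∈ dr, w ≤ s.toList.length) :
    (List.range w).foldl
      (fun (ge : List Char × List Char) (k : Nat) =>
        if 2 * (dr.foldl
            (fun count entry =>
              if PySem.Str.pyGet? entry ((k : Nat) : Int) = some '1' then count + 1 else count)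
            (0 : Int)) > (dr.length : Int) then
          (ge.1 ++ ['1'], ge.2 ++ ['0'])
        else
          (ge.1 ++ ['0'], ge.2 ++ ['1']))
      ([], [])
      = ((pvBits dr w).map (fun b => if b then '1' else '0'),
         (pvBits dr w).map (fun b => if !b then '1' else '0')) := by
  induction w with
  | zero => simp [pvBits]
  | succ w ih =>
    have hw : ∀ s ∈ dr, w ≤ s.toList.length := fun s hs => Nat.le_of_succ_le (h s hs)
    have hlt : ∀ s ∈ dr, w < s.toList.length := fun s hs => h s hs
    rw [List.range_succ, List.foldl_append, ih hw]
    simp only [List.foldl_cons, List.foldl_nil]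
    rw [countA_eq dr w 0 hlt, zero_add]
    have hb : pvBits dr (w + 1) = pvBits dr w ++ [pvBit dr w] := by
      simp [pvBits, List.range_succ]
    rw [hb]
    by_cases hc : (2 : Int) * ((pvCol dr w).count '1' : Int) > (dr.length : Int) <;>
      simp [pvBit, hc]

-- B's row-major pass: folding the zip-map update over the rows turns the initial counter
-- vector into the vector of per-column '1'-counts (the traversal-order-swap lemma)
theorem rowFold_eq (dr : List String) (counts : List Int)
    (h : ∀ s ∈ dr, counts.length ≤ s.toList.length) :
    dr.foldl
      (fun (cs : List Int) entry =>
        (PySem.List.enumerate cs 0).map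
          (fun p => p.2 + (if PySem.Str.pyGet? entry p.1 = some '1' then (1 : Int) else 0)))
      counts
      = (List.range counts.length).map
          (fun j => counts.getD j 0 + ((pvCol dr j).count '1' : Int)) := by
  induction dr generalizing counts with
  | nil =>
    simp only [List.foldl_nil, pvCol, List.map_nil, List.count_nil, Nat.cast_zero, add_zero]
    apply List.ext_getElem
    · simp
    · intro i h1 h2
      simp [List.getElem?_eq_getElem h1]
  | cons s rest ih =>
    have hs : counts.length ≤ s.toList.length := h s (List.mem_cons_self)
    have hrest : ∀ t ∈ rest, counts.length ≤ t.toList.length :=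
      fun t ht => h t (List.mem_cons_of_mem _ ht)
    simp only [List.foldl_cons]
    set counts' := (PySem.List.enumerate counts 0).map
        (fun p => p.2 + (if PySem.Str.pyGet? s p.1 = some '1' then (1 : Int) else 0))
      with hc'
    have hlen' : counts'.length = counts.length := by
      simp [hc', PySem.List.length_enumerate]
    have hrest' : ∀ t ∈ rest, counts'.length ≤ t.toList.length := by
      rw [hlen']; exact hrest
    rw [ih counts' hrest', hlen']
    apply List.map_congr_left
    intro j hj
    rw [List.mem_range] at hj
    have hjs : j < s.toList.length := lt_of_lt_of_le hj hs
    have hget' : counts'.getD j 0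
        = counts.getD j 0 + (if s.toList[j] = '1' then (1 : Int) else 0) := by
      have hjc' : j < counts'.length := by rw [hlen']; exact hj
      have hje : j < (PySem.List.enumerate counts 0).length := by
        rw [PySem.List.length_enumerate]; exact hj
      rw [List.getD_eq_getElem _ _ hjc', List.getD_eq_getElem _ _ hj]
      simp [hc', PySem.List.getElem_enumerate, List.getElem?_eq_getElem hjs]
    rw [hget']
    have hcol : (pvCol (s :: rest) j).count '1'
        = (if s.toList[j] = '1' then 1 else 0) + (pvCol rest j).count '1' := by
      simp only [pvCol, List.map_cons, List.count_cons,
        List.getD_eq_getElem _ _ hjs]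
      by_cases hcq : s.toList[j] = '1' <;> simp [hcq] <;> omega
    rw [hcol]
    by_cases hcq : s.toList[j] = '1' <;> simp [hcq] <;> push_cast <;> ring

-- ===== VERDICT (by name: the statement is the Claim_ definition above) =====
theorem power_consumption_spec : Claim_equal_power_consumption := by
  intro dr _ hpre
  obtain ⟨hne, hpos, hall⟩ := hpre
  obtain ⟨s, rest, rfl⟩ := List.exists_cons_of_ne_nil hne
  simp only [List.headD_cons] at hpos hall
  unfold Spec_power_consumption power_consumption power_consumption_alt
  simp only [PySem.List.pyGetD_zero_cons, PySem.Str.len_eq, Int.toNat_natCast,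
    PySem.List.pyRange_one, Int.sub_zero, List.foldl_map, zero_add]
  rw [foldA_eq (s :: rest) s.toList.length hall]
  have hrepl : (List.replicate s.toList.length (0 : Int)).length = s.toList.length := by simp
  rw [show (List.replicate s.toList.length (0 : Int)) =
        (List.replicate s.toList.length (0 : Int)) from rfl,
    rowFold_eq (s :: rest) (List.replicate s.toList.length 0) (by rw [hrepl]; exact hall),
    hrepl]
  -- gamma from the counter vector is the binary value of the majority bits
  have hgamma :
      ((List.range s.toList.length).map
          (fun j => (List.replicate s.toList.length (0 : Int)).getD j 0
            + ((pvCol (s :: rest) j).count '1' : Int))).foldl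
        (fun g ones => 2 * g + (if 2 * ones > ((s :: rest).length : Int) then (1 : Int) else 0)) 0
      = pvBinAux 0 (pvBits (s :: rest) s.toList.length) := by
    rw [List.foldl_map]
    unfold pvBits pvBinAux
    rw [List.foldl_map]
    apply PySem.List.foldl_congr_mem
    intro a j hj
    rw [List.mem_range] at hj
    rw [List.getD_eq_getElem _ _ (by simpa using hj)]
    simp only [List.getElem_replicate, zero_add, pvBit]
    by_cases hcq : (2 : Int) * ((pvCol (s :: rest) j).count '1' : Int) > ((s :: rest).length : Int) <;>
      simp [hcq]
  rw [hgamma]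
  have h1 := pvIntBase2_bits (pvBits (s :: rest) s.toList.length) 0
  have h2 := pvIntBase2_nbits (pvBits (s :: rest) s.toList.length) 0
  have hc := pvBinAux_compl (pvBits (s :: rest) s.toList.length)
  have hlen : (pvBits (s :: rest) s.toList.length).length = s.toList.length := by simp [pvBits]
  rw [hlen] at hc
  unfold pvIntBase2
  rw [h1, h2, Int.shiftLeft_eq, one_mul]
  have hnot : pvBinAux 0 ((pvBits (s :: rest) s.toList.length).map (fun b => !b))
      = 2 ^ s.toList.length - 1 - pvBinAux 0 (pvBits (s :: rest) s.toList.length) := by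
    omega
  rw [hnot]
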